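-- pv_equiv track=rewrite | github.com/feraranas/ICPC-Algorithmic-Contests | Backtracking/sumString/sumString.py | checkSumStringUtil
-- ===== SOURCE A (Python) =====
-- def sumTwoStrings(str1, str2):
--
--     if (len(str1) < len(str2)):
--         str1, str2 = str2,str1
--
--     m = len(str1)
--     n = len(str2)
--     ans = ""
--
--     carry = 0
--
--     # FIRST PART. Sums the most upright strings. The smallest string goes down.
--     # str1 = 438512 +
--     # str2 =    123
--     #      = --------
--     #           634
--     for i in range(n):
--
--         # Sum of current digits
--         ds = ((ord(str1[m - 1 - i]) - ord('0')) +
--                 (ord(str2[n - 1 - i]) - ord('0')) +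
--                 carry) % 10
--
--         carry = ((ord(str1[m - 1 - i]) - ord('0')) +
--                 (ord(str2[n - 1 - i]) - ord('0')) +
--                 carry) // 10
--
--         ans = str(ds) + ans
--
--     # SECOND PART. Sums the left string that remain. The largest string at the top.
--     # str1 = 438512 +
--     # str2 =    123
--     #      = --------
--     #        438 634
--     for i in range(n,m):
--         ds = (ord(str1[m - 1 - i]) - ord('0') +
--                 carry) % 10
--         carry = (ord(str1[m - 1 - i]) - ord('0') +
--                 carry) // 10
--         ans = str(ds) + ans
--
--     if (carry):
--         ans = str(carry) + ans
--     return ans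
--
-- def checkSumStringUtil(Str, beg, len1, len2):
--
--     # Finding two substrings of given lengths and their sum
--     s1 = Str[beg: beg + len1]
--     s2 = Str[beg + len1: beg + len1 + len2]
--     s3 = sumTwoStrings(s1, s2)
--
--     s3_len = len(s3)
--
--     # if number of digits s3 is greater than the available string size
--     if (s3_len > len(Str) - len1 - len2 - beg):
--         return False
--
--     # s3 as the next number of the main string
--     if (s3 == Str[beg + len1 + len2: beg + len1 + len2 + s3_len]):
--
--         # If we have reached the end of the string
--         if (beg + len1 + len2 + s3_len == len(Str)):
--             return True
--
--         # otherwise call recursively for n2, s3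
--         return checkSumStringUtil(Str, beg + len1, len2, s3_len)
--
--     # If we don't get s3 in the main string
--     return False
-- ===== SOURCE B (Python) =====
-- def _addStrings(a, b):
--     # digit lists, least-significant first, zero-padded to equal length, then one structural pass
--     da = [ord(c) - 48 for c in reversed(a)]
--     db = [ord(c) - 48 for c in reversed(b)]
--     k = max(len(da), len(db))
--     da += [0] * (k - len(da))
--     db += [0] * (k - len(db))
--     out = []
--     carry = 0
--     for x, y in zip(da, db):
--         carry, d = divmod(x + y + carry, 10)
--         out.append(str(d))
--     if carry:
--         out.append(str(carry))
--     return ''.join(reversed(out))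
--
-- def checkSumStringUtil(Str, beg, len1, len2):
--     n = len(Str)
--     s1 = Str[beg: beg + len1]
--     s2 = Str[beg + len1: beg + len1 + len2]
--     pos = beg + len1 + len2
--     while True:
--         s3 = _addStrings(s1, s2)
--         if len(s3) > n - pos:
--             return False
--         if Str[pos: pos + len(s3)] != s3:
--             return False
--         pos += len(s3)
--         if pos == n:
--             return True
--         s1, s2 = s2, s3
-- ===== Notes on version B (the rewrite author's own statement) =====
-- stated objective: faster
-- what changed: B replaces A's tail recursion on index triples (beg,len1,len2) by a while-loop that carries the actual substrings s1,s2 and a single position pointer (so s1,s2 are never re-sliced), and replaces the swap-plus-two-index-loops digit addition by building zero-padded least-significant-first digit lists and folding once over their zip, collecting digit chunks and joining once instead of repeatedly prepending to a string.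
-- outside the precondition, e.g. on checkSumStringUtil('11', 0, -1, 2): A returns True, B returns True; on checkSumStringUtil('12', 1, -1, 1): A returns False, B returns False; on checkSumStringUtil('11', 0, 0, 0): A raises RecursionError, B does not finish within the time limit
import Mathlib
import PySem

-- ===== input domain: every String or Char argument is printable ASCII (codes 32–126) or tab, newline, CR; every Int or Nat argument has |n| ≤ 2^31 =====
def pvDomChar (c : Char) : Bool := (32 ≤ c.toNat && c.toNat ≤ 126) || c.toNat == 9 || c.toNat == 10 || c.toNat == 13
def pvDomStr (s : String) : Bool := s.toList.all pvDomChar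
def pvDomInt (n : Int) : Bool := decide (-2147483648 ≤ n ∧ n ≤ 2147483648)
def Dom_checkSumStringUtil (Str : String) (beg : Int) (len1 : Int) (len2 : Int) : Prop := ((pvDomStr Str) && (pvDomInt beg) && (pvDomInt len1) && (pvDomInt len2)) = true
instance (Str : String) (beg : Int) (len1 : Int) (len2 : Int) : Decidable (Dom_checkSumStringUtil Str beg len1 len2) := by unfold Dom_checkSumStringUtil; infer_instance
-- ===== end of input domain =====

-- B replaces A's tail recursion on index triples by a while-loop carrying the actual substrings
-- s1, s2 and one position pointer, and replaces the swap-plus-two-index-loops addition by one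
-- structural fold over the zip of zero-padded digit lists, joining the chunks once
-- (objective: faster — a linear mechanism for the digit addition instead of repeated string prepending).

-- ===== PORT A =====
-- ord(c) on a Char (code point), exact for the ASCII domain
def pvOrd (c : Char) : Int := (c.toNat : Int)

-- the body of sumTwoStrings after the conditional swap: str2 is the (weakly) shorter string.
-- Python's in-place swap 'str1, str2 = str2, str1' is rendered as calling the body on swapped
-- arguments (same computation, same values).
def pvSumCore (str1 str2 : List Char) : List Char :=
  let m : Int := (str1.length : Int)
  let n : Int := (str2.length : Int)
  -- for i in range(n): ds/carry from both strings, ans = str(ds) + ans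
  let st1 := (PySem.List.pyRange 0 n 1).foldl
    (fun (st : Int × List Char) i =>
      let v := (pvOrd (PySem.List.pyGetD str1 (m - 1 - i) ' ') - 48)
             + (pvOrd (PySem.List.pyGetD str2 (n - 1 - i) ' ') - 48) + st.1
      (PySem.Int.floordiv v 10, PySem.Int.toChars (PySem.Int.mod v 10) ++ st.2))
    ((0 : Int), ([] : List Char))
  -- for i in range(n, m): ds/carry from str1 only
  let st2 := (PySem.List.pyRange n m 1).foldl
    (fun (st : Int × List Char) i =>
      let v := (pvOrd (PySem.List.pyGetD str1 (m - 1 - i) ' ') - 48) + st.1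
      (PySem.Int.floordiv v 10, PySem.Int.toChars (PySem.Int.mod v 10) ++ st.2))
    st1
  if st2.1 ≠ 0 then PySem.Int.toChars st2.1 ++ st2.2 else st2.2

def sumTwoStringsA (s1 s2 : List Char) : List Char :=
  if s1.length < s2.length then pvSumCore s2 s1 else pvSumCore s1 s2

-- A's recursion, with a fuel counter as a pure totality guard (inside Pre_ the recursion
-- depth is at most len(Str), so fuel len(Str)+1 never runs out there)
def pvGoA (cs : List Char) : Nat → Int → Int → Int → Bool
  | 0, _, _, _ => false
  | fuel + 1, beg, len1, len2 =>
    let s1 := PySem.List.slice cs (some beg) (some (beg + len1))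
    let s2 := PySem.List.slice cs (some (beg + len1)) (some (beg + len1 + len2))
    let s3 := sumTwoStringsA s1 s2
    let s3len : Int := (s3.length : Int)
    if s3len > (cs.length : Int) - len1 - len2 - beg then false
    else if s3 = PySem.List.slice cs (some (beg + len1 + len2)) (some (beg + len1 + len2 + s3len)) then
      if beg + len1 + len2 + s3len = (cs.length : Int) then true
      else pvGoA cs fuel (beg + len1) len2 s3len
    else false

def checkSumStringUtil (Str : String) (beg : Int) (len1 : Int) (len2 : Int) : Bool :=
  pvGoA Str.toList (Str.toList.length + 1) beg len1 len2

-- ===== PORT B =====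
-- Source B's digit lists: [ord(c) - 48 for c in reversed(x)]
def pvDigits (x : List Char) : List Int := x.reverse.map (fun c => pvOrd c - 48)

-- the loop body of Source B's single pass: divmod(x + y + carry, 10), out.append(str(d)).
-- divmod is ported as (floordiv, mod) — exact, divisor 10 ≠ 0.
def pvStepApp {α : Type} (f : α → Int) (st : Int × List (List Char)) (x : α) : Int × List (List Char) :=
  (PySem.Int.floordiv (f x + st.1) 10, st.2 ++ [PySem.Int.toChars (PySem.Int.mod (f x + st.1) 10)])

-- Source B's _addStrings: pad both digit lists to the same length with zeros, fold once over their
-- zip, then ''.join(reversed(out)) (= reverse and flatten)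
def pvAddStringsB (a b : List Char) : List Char :=
  let da := pvDigits a
  let db := pvDigits b
  let k := max da.length db.length
  let da' := da ++ List.replicate (k - da.length) (0 : Int)
  let db' := db ++ List.replicate (k - db.length) (0 : Int)
  let st := (da'.zip db').foldl (pvStepApp (fun xy => xy.1 + xy.2)) ((0 : Int), ([] : List (List Char)))
  let out := if st.1 ≠ 0 then st.2 ++ [PySem.Int.toChars st.1] else st.2
  out.reverse.flatten

-- Source B's while-True loop: the state is the two CURRENT SUBSTRINGS and the position pointer
-- (never index triples); fuel is the same pure totality guard as in port A
def pvGoB (cs : List Char) (n : Int) : Nat → List Char → List Char → Int → Bool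
  | 0, _, _, _ => false
  | fuel + 1, s1, s2, pos =>
    let s3 := pvAddStringsB s1 s2
    let s3len : Int := (s3.length : Int)
    if s3len > n - pos then false
    else if PySem.List.slice cs (some pos) (some (pos + s3len)) ≠ s3 then false
    else if pos + s3len = n then true
    else pvGoB cs n fuel s2 s3 (pos + s3len)

def checkSumStringUtil_alt (Str : String) (beg : Int) (len1 : Int) (len2 : Int) : Bool :=
  let cs := Str.toList
  let n : Int := (cs.length : Int)
  let s1 := PySem.List.slice cs (some beg) (some (beg + len1))
  let s2 := PySem.List.slice cs (some (beg + len1)) (some (beg + len1 + len2))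
  pvGoB cs n (cs.length + 1) s1 s2 (beg + len1 + len2)

-- ===== PRECONDITION & SPEC =====
-- Pre_ restricts to the natural domain of the backtracking caller (beg ≥ 0, non-negative segment
-- lengths, at least one segment non-empty) plus the region where the segments already overrun the
-- string (immediate False); outside it A's recursion can run forever (RecursionError, e.g.
-- ("11", 0, 0, 0) or ("1", -5, 1, 2)) and B's loop diverges the same way; negative lengths and a
-- negative beg are outside the natural domain (the backtracking caller only passes beg ≥ 0 and
-- non-negative lengths), and on some of them A recurses forever.
def Pre_checkSumStringUtil (Str : String) (beg : Int) (len1 : Int) (len2 : Int) : Prop :=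
  (0 ≤ beg ∧ 0 ≤ len1 ∧ 0 ≤ len2 ∧ 1 ≤ len1 + len2) ∨ (Str.toList.length : Int) < beg + len1 + len2
instance (Str : String) (beg : Int) (len1 : Int) (len2 : Int) : Decidable (Pre_checkSumStringUtil Str beg len1 len2) := by unfold Pre_checkSumStringUtil; infer_instance

def pvWitness_checkSumStringUtil : String × Int × Int × Int := ("1123", 0, 1, 1)

def Spec_checkSumStringUtil (Str : String) (beg : Int) (len1 : Int) (len2 : Int) (out : Bool) : Prop := out = checkSumStringUtil_alt Str beg len1 len2
instance (Str : String) (beg : Int) (len1 : Int) (len2 : Int) (out : Bool) : Decidable (Spec_checkSumStringUtil Str beg len1 len2 out) := by unfold Spec_checkSumStringUtil; infer_instance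

-- ===== CLAIM (what is proved, stated in full; the proofs are below) =====
def Claim_equal_checkSumStringUtil : Prop := ∀ (Str : String) (beg : Int) (len1 : Int) (len2 : Int), Dom_checkSumStringUtil Str beg len1 len2 → Pre_checkSumStringUtil Str beg len1 len2 → Spec_checkSumStringUtil Str beg len1 len2 (checkSumStringUtil Str beg len1 len2)

-- ===== LEMMAS AND PROOFS =====

-- digit value contributed at reversed position i by string a (0 when i is past a's end)
def pvDig (a : List Char) (i : Int) : Int :=
  if i < (a.length : Int) then pvOrd (PySem.List.pyGetD a.reverse i ' ') - 48 else 0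

def pvVal (a b : List Char) (i : Int) : Int := pvDig a i + pvDig b i

-- canonical carry loop: prepend-style fold of the per-position values
def pvStepPre {α : Type} (f : α → Int) (st : Int × List Char) (x : α) : Int × List Char :=
  (PySem.Int.floordiv (f x + st.1) 10, PySem.Int.toChars (PySem.Int.mod (f x + st.1) 10) ++ st.2)

def pvCanon (a b : List Char) : List Char :=
  let st := (PySem.List.pyRange 0 ((max a.length b.length : Nat) : Int) 1).foldl
    (pvStepPre (pvVal a b)) ((0 : Int), ([] : List Char))
  if st.1 ≠ 0 then PySem.Int.toChars st.1 ++ st.2 else st.2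

lemma pvDig_rev (x : List Char) (i : Int) (h0 : 0 ≤ i) (h1 : i < (x.length : Int)) :
    pvDig x i = pvOrd (PySem.List.pyGetD x ((x.length : Int) - 1 - i) ' ') - 48 := by
  have h1' : i < ((x.reverse.length : Nat) : Int) := by simpa using h1
  have h2 : ((x.length : Int) - 1 - i).toNat = x.length - 1 - i.toNat := by omega
  rw [pvDig, if_pos h1, PySem.List.pyGetD_eq_getElem _ ' ' h0 h1',
    PySem.List.pyGetD_eq_getElem _ ' ' (by omega) (by omega)]
  simp [List.getElem_reverse, h2]

lemma pvDig_past (x : List Char) (i : Int) (h : (x.length : Int) ≤ i) : pvDig x i = 0 := by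
  rw [pvDig, if_neg (by omega)]

-- append-style fold with a final reverse+flatten equals the prepend-style fold
lemma pv_app_pre {α : Type} (f : α → Int) (L : List α) : ∀ (c : Int) (out : List (List Char)),
    (L.foldl (pvStepApp f) (c, out)).1 = (L.foldl (pvStepPre f) (c, out.reverse.flatten)).1 ∧
    ((L.foldl (pvStepApp f) (c, out)).2).reverse.flatten
      = (L.foldl (pvStepPre f) (c, out.reverse.flatten)).2 := by
  induction L with
  | nil => intro c out; exact ⟨rfl, rfl⟩
  | cons x L ih =>
    intro c out
    have h : ((out ++ [PySem.Int.toChars (PySem.Int.mod (f x + c) 10)]).reverse).flatten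
        = PySem.Int.toChars (PySem.Int.mod (f x + c) 10) ++ out.reverse.flatten := by
      simp
    simpa [pvStepApp, pvStepPre, h] using
      ih (PySem.Int.floordiv (f x + c) 10)
        (out ++ [PySem.Int.toChars (PySem.Int.mod (f x + c) 10)])

lemma pvVal_comm (a b : List Char) : pvVal a b = pvVal b a := by
  funext i; simp [pvVal, add_comm]

lemma pvCanon_comm (a b : List Char) : pvCanon a b = pvCanon b a := by
  simp [pvCanon, pvVal_comm a b, Nat.max_comm a.length b.length]

-- A's two loops (str2 weakly shorter) compute the canonical loop
lemma pvSumCore_eq (x y : List Char) (h : y.length ≤ x.length) :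
    pvSumCore x y = pvCanon x y := by
  have hmax : max x.length y.length = x.length := Nat.max_eq_left h
  have hsplit : PySem.List.pyRange 0 ((x.length : Nat) : Int) 1
      = PySem.List.pyRange 0 ((y.length : Nat) : Int) 1
        ++ PySem.List.pyRange ((y.length : Nat) : Int) ((x.length : Nat) : Int) 1 :=
    PySem.List.pyRange_one_append _ _ _ (by positivity) (by exact_mod_cast h)
  have h1 : ∀ (st : Int × List Char), ∀ i ∈ PySem.List.pyRange 0 ((y.length : Nat) : Int) 1,
      (fun (st : Int × List Char) i =>
        let v := (pvOrd (PySem.List.pyGetD x (((x.length : Nat) : Int) - 1 - i) ' ') - 48)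
               + (pvOrd (PySem.List.pyGetD y (((y.length : Nat) : Int) - 1 - i) ' ') - 48) + st.1
        (PySem.Int.floordiv v 10, PySem.Int.toChars (PySem.Int.mod v 10) ++ st.2)) st i
      = pvStepPre (pvVal x y) st i := by
    intro st i hi
    rcases (PySem.List.mem_pyRange_one).1 hi with ⟨hi0, hi1⟩
    have hx := pvDig_rev x i hi0 (by exact_mod_cast lt_of_lt_of_le hi1 (by exact_mod_cast h))
    have hy := pvDig_rev y i hi0 hi1
    simp only [pvStepPre, pvVal, hx, hy]
  have h2 : ∀ (st : Int × List Char),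
      ∀ i ∈ PySem.List.pyRange ((y.length : Nat) : Int) ((x.length : Nat) : Int) 1,
      (fun (st : Int × List Char) i =>
        let v := (pvOrd (PySem.List.pyGetD x (((x.length : Nat) : Int) - 1 - i) ' ') - 48) + st.1
        (PySem.Int.floordiv v 10, PySem.Int.toChars (PySem.Int.mod v 10) ++ st.2)) st i
      = pvStepPre (pvVal x y) st i := by
    intro st i hi
    rcases (PySem.List.mem_pyRange_one).1 hi with ⟨hi0, hi1⟩
    have hx := pvDig_rev x i (le_trans (by positivity) hi0) hi1
    have hy := pvDig_past y i hi0
    simp only [pvStepPre, pvVal, hx, hy, add_zero]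
  simp only [pvSumCore, pvCanon, hmax, hsplit, List.foldl_append]
  rw [PySem.List.foldl_congr_mem _ _ _ _ h1, PySem.List.foldl_congr_mem _ _ _ _ h2]

-- a fold over pyRange 0 len(l) reading l[i] is the structural fold over l
lemma pv_fold_index_eq {α β : Type} (g : β → α → β) (d : α) :
    ∀ (l : List α) (init : β),
      (PySem.List.pyRange 0 ((l.length : Nat) : Int) 1).foldl
        (fun st i => g st (PySem.List.pyGetD l i d)) init = l.foldl g init := by
  intro l
  induction l using List.reverseRecOn with
  | nil => intro init; rw [PySem.List.pyRange_one_eq_nil (by simp)]; rfl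
  | append_singleton l x ih =>
    intro init
    have hlen : (((l ++ [x]).length : Nat) : Int) = ((l.length : Nat) : Int) + 1 := by
      simp
    have hsplit : PySem.List.pyRange 0 (((l ++ [x]).length : Nat) : Int) 1
        = PySem.List.pyRange 0 ((l.length : Nat) : Int) 1
          ++ PySem.List.pyRange ((l.length : Nat) : Int) (((l ++ [x]).length : Nat) : Int) 1 :=
      PySem.List.pyRange_one_append _ _ _ (by positivity) (by rw [hlen]; omega)
    have hlt : ((l.length : Nat) : Int) < (((l ++ [x]).length : Nat) : Int) := by
      rw [hlen]; omega
    have hone : PySem.List.pyRange ((l.length : Nat) : Int) (((l ++ [x]).length : Nat) : Int) 1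
        = [((l.length : Nat) : Int)] := by
      rw [PySem.List.pyRange_one_cons hlt, PySem.List.pyRange_one_eq_nil (by rw [hlen])]
    have hc : ∀ (st : β), ∀ i ∈ PySem.List.pyRange 0 ((l.length : Nat) : Int) 1,
        (fun st i => g st (PySem.List.pyGetD (l ++ [x]) i d)) st i
        = (fun st i => g st (PySem.List.pyGetD l i d)) st i := by
      intro st i hi
      rcases (PySem.List.mem_pyRange_one).1 hi with ⟨hi0, hi1⟩
      have h1 : i < (((l ++ [x]).length : Nat) : Int) := by rw [hlen]; omega
      show g st (PySem.List.pyGetD (l ++ [x]) i d) = g st (PySem.List.pyGetD l i d)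
      rw [PySem.List.pyGetD_eq_getElem _ d hi0 h1, PySem.List.pyGetD_eq_getElem _ d hi0 hi1]
      congr 1
      exact List.getElem_append_left (by omega)
    have hlast : PySem.List.pyGetD (l ++ [x]) ((l.length : Nat) : Int) d = x := by
      rw [PySem.List.pyGetD_eq_getElem _ d (by positivity) hlt]
      simp
    rw [hsplit, List.foldl_append, PySem.List.foldl_congr_mem _ _ _ _ hc, ih, hone]
    simp [hlast]

lemma pvDigits_length (x : List Char) : (pvDigits x).length = x.length := by
  simp [pvDigits]

lemma pvPad_len (x : List Char) (m : Nat) (h : x.length ≤ m) :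
    (pvDigits x ++ List.replicate (m - x.length) (0 : Int)).length = m := by
  simp [pvDigits_length]; omega

-- the zero-padded digit list reads pvDig x i at index i
lemma pvPad_get (x : List Char) (m : Nat) (i : Int) (h0 : 0 ≤ i) (hm : x.length ≤ m)
    (hi : i.toNat < m) :
    (pvDigits x ++ List.replicate (m - x.length) (0 : Int))[i.toNat]'(by rw [pvPad_len x m hm]; exact hi)
    = pvDig x i := by
  by_cases hx : i.toNat < x.length
  · rw [List.getElem_append_left (by rw [pvDigits_length]; exact hx)]
    rw [pvDig, if_pos (by omega)]
    have hrev : i < ((x.reverse.length : Nat) : Int) := by simp; omega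
    rw [PySem.List.pyGetD_eq_getElem _ ' ' h0 hrev]
    simp [pvDigits, pvOrd]
  · rw [List.getElem_append_right (by rw [pvDigits_length]; omega)]
    rw [pvDig, if_neg (by omega)]
    simp

-- the zipped padded digit lists read (pvDig a i, pvDig b i) at index i
lemma pvZip_get (a b : List Char) (m : Nat) (hma : a.length ≤ m) (hmb : b.length ≤ m)
    (i : Int) (h0 : 0 ≤ i) (hi : i.toNat < m) :
    PySem.List.pyGetD
      ((pvDigits a ++ List.replicate (m - a.length) (0 : Int)).zip
       (pvDigits b ++ List.replicate (m - b.length) (0 : Int))) i ((0 : Int), (0 : Int))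
    = (pvDig a i, pvDig b i) := by
  have hz : ((pvDigits a ++ List.replicate (m - a.length) (0 : Int)).zip
      (pvDigits b ++ List.replicate (m - b.length) (0 : Int))).length = m := by
    rw [List.length_zip, pvPad_len a m hma, pvPad_len b m hmb, Nat.min_self]
  rw [PySem.List.pyGetD_eq_getElem _ _ h0 (by rw [hz]; omega)]
  rw [List.getElem_zip]
  rw [pvPad_get a m i h0 hma hi, pvPad_get b m i h0 hmb hi]

lemma pvAddStringsB_eq_canon (a b : List Char) : pvAddStringsB a b = pvCanon a b := by
  have hma : a.length ≤ max a.length b.length := le_max_left _ _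
  have hmb : b.length ≤ max a.length b.length := le_max_right _ _
  have hzlen : ((pvDigits a ++ List.replicate (max a.length b.length - a.length) (0 : Int)).zip
      (pvDigits b ++ List.replicate (max a.length b.length - b.length) (0 : Int))).length
      = max a.length b.length := by
    rw [List.length_zip, pvPad_len a _ hma, pvPad_len b _ hmb, Nat.min_self]
  obtain ⟨hc, hv⟩ := pv_app_pre (fun xy : Int × Int => xy.1 + xy.2)
    ((pvDigits a ++ List.replicate (max a.length b.length - a.length) (0 : Int)).zip
     (pvDigits b ++ List.replicate (max a.length b.length - b.length) (0 : Int))) 0 []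
  simp only [List.reverse_nil, List.flatten_nil] at hc hv
  have hbridge := pv_fold_index_eq (pvStepPre (fun xy : Int × Int => xy.1 + xy.2))
    ((0 : Int), (0 : Int))
    ((pvDigits a ++ List.replicate (max a.length b.length - a.length) (0 : Int)).zip
     (pvDigits b ++ List.replicate (max a.length b.length - b.length) (0 : Int)))
    ((0 : Int), ([] : List Char))
  have hcong : ∀ (st : Int × List Char),
      ∀ i ∈ PySem.List.pyRange 0 ((max a.length b.length : Nat) : Int) 1,
      pvStepPre (pvVal a b) st i
      = (fun st i => pvStepPre (fun xy : Int × Int => xy.1 + xy.2) st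
          (PySem.List.pyGetD
            ((pvDigits a ++ List.replicate (max a.length b.length - a.length) (0 : Int)).zip
             (pvDigits b ++ List.replicate (max a.length b.length - b.length) (0 : Int)))
            i ((0 : Int), (0 : Int)))) st i := by
    intro st i hi
    rcases (PySem.List.mem_pyRange_one).1 hi with ⟨hi0, hi1⟩
    show pvStepPre (pvVal a b) st i = pvStepPre (fun xy : Int × Int => xy.1 + xy.2) st _
    rw [pvZip_get a b (max a.length b.length) hma hmb i hi0 (by omega)]
    simp only [pvStepPre, pvVal]
  rw [hzlen] at hbridge
  simp only [pvAddStringsB, pvDigits_length, pvCanon,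
    PySem.List.foldl_congr_mem _ _ _ _ hcong, hbridge]
  rw [hc]
  by_cases hz : (((pvDigits a ++ List.replicate (max a.length b.length - a.length) (0 : Int)).zip
      (pvDigits b ++ List.replicate (max a.length b.length - b.length) (0 : Int))).foldl
      (pvStepPre (fun xy : Int × Int => xy.1 + xy.2)) ((0 : Int), ([] : List Char))).1 = 0
  · simp [hz, hv]
  · simp [hz, hv]

lemma pvSum_eq (a b : List Char) : sumTwoStringsA a b = pvAddStringsB a b := by
  rw [pvAddStringsB_eq_canon]
  by_cases hlt : a.length < b.length
  · rw [sumTwoStringsA, if_pos hlt, pvSumCore_eq b a (le_of_lt hlt), pvCanon_comm]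
  · rw [sumTwoStringsA, if_neg hlt, pvSumCore_eq a b (by omega)]

-- loop invariant: B's state (s1, s2, pos) is the pair of slices and end position of A's index triple
lemma pvGo_eq (cs : List Char) : ∀ (fuel : Nat) (beg len1 len2 : Int),
    pvGoA cs fuel beg len1 len2
      = pvGoB cs (cs.length : Int) fuel
          (PySem.List.slice cs (some beg) (some (beg + len1)))
          (PySem.List.slice cs (some (beg + len1)) (some (beg + len1 + len2)))
          (beg + len1 + len2) := by
  intro fuel
  induction fuel with
  | zero => intro beg len1 len2; rfl
  | succ fuel ih =>
    intro beg len1 len2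
    simp only [pvGoA, pvGoB, pvSum_eq]
    have e1 : (cs.length : Int) - len1 - len2 - beg = (cs.length : Int) - (beg + len1 + len2) := by
      ring
    rw [e1]
    split_ifs with hbig hne hend hend' h5 h6 h7
    · rfl
    · exact absurd hne.symm hend'
    · rfl
    · exact absurd hne.symm h5
    · rw [ih, ← hne]
    · rfl
    · exact absurd (not_not.1 h6).symm hne
    · exact absurd (not_not.1 h6).symm hne

-- ===== VERDICT (by name: the statement is the Claim_ definition above) =====
theorem checkSumStringUtil_spec : Claim_equal_checkSumStringUtil := by
  intro Str beg len1 len2 _ _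
  unfold Spec_checkSumStringUtil checkSumStringUtil checkSumStringUtil_alt
  exact pvGo_eq Str.toList _ beg len1 len2
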